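-- pv_equiv track=rewrite | github.com/bdunford/waabi | waabi/utility/finder.py | LineNumbers
-- ===== SOURCE A (Python) =====
-- def LineNumbers(content,values):
--     values = values if isinstance(values,list) else [values]
--     lines = []
--     line_map = [(1,0)]
--     for line, indx in enumerate([i for i in range(len(content)) if content[i] == "\n"]):
--         line_map.append((line + 2,indx))
--
--     for v in values:
--         indx=0
--         ln=1
--         inc=0
--         while indx > -1:
--             indx = content.find(v,indx+inc)
--             if indx > -1:
--                 for lm in line_map:
--                     if indx < lm[1]:
--                         break
--                     else:
--                         ln = lm[0]
--                 lines.append(ln)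
--             inc = 1
--
--     return list(sorted(set(lines)))
-- ===== SOURCE B (Python) =====
-- def LineNumbers(content, values):
--     values = values if isinstance(values, list) else [values]
--     # line_of[i] = line number of character position i (a match starting at a
--     # newline belongs to the next line, as in the original); one extra slot for
--     # the position len(content) reachable by searching for "".
--     line_of = []
--     ln = 1
--     for ch in content:
--         if ch == "\n":
--             ln += 1
--         line_of.append(ln)
--     line_of.append(ln)
--     found = set()
--     for v in values:
--         i = content.find(v)
--         while i != -1:
--             found.add(line_of[i])
--             i = content.find(v, i + 1)
--     return sorted(found)
-- ===== Notes on version B (the rewrite author's own statement) =====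
-- stated objective: alternative
-- what changed: B precomputes a position-to-line-number table in one pass over the content and looks each match position up directly, instead of A's per-occurrence linear rescan of the whole line map, and collects line numbers straight into a set.
import Mathlib
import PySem

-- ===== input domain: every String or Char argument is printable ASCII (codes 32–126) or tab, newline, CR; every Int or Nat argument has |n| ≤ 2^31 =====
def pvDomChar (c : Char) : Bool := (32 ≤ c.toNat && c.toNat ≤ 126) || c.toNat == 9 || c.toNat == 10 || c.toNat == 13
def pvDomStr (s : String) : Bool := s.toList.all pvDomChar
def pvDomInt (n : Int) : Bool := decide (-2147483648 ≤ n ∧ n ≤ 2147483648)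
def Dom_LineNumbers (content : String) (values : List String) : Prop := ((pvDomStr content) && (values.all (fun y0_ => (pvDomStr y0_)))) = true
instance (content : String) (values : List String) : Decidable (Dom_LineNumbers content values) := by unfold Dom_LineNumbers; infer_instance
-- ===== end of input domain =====

-- B replaces A's per-occurrence linear rescan of the line map by a table,
-- built in one pass, mapping each character position to its line number,
-- looked up directly per occurrence; objective: alternative.

-- ===== PORT A =====
-- A's inner 'for lm in line_map: if indx < lm[1]: break else: ln = lm[0]'
def pvScanLineMap : List (Int × Int) → Int → Int → Int
  | [], _, ln => ln
  | lm :: rest, indx, ln => if indx < lm.2 then ln else pvScanLineMap rest indx lm.1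

-- A's 'while indx > -1' loop for one value v (fuel bounds the iteration count;
-- the search index strictly increases, so length content + 3 iterations suffice)
def pvWhileA (content : String) (lineMap : List (Int × Int)) (v : String) :
    Nat → Int → Int → Int → List Int → List Int
  | 0, _, _, _, lines => lines
  | fuel + 1, indx, inc, ln, lines =>
    if indx > -1 then
      let indx' := PySem.Str.findFrom content v (indx + inc)
      if indx' > -1 then
        let ln' := pvScanLineMap lineMap indx' ln
        pvWhileA content lineMap v fuel indx' 1 ln' (lines ++ [ln'])
      else
        pvWhileA content lineMap v fuel indx' 1 ln lines
    else lines

def LineNumbers (content : String) (values : List String) : List Int :=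
  let nls := (PySem.List.pyRange 0 (PySem.Str.len content) 1).filter
      (fun i => PySem.Str.pyGet? content i == some '\n')
  let lineMap := (PySem.List.enumerate nls 0).foldl
      (fun acc p => acc ++ [(p.1 + 2, p.2)]) [((1 : Int), (0 : Int))]
  let lines := values.foldl
      (fun lines v =>
        pvWhileA content lineMap v (content.toList.length + 3) 0 0 1 lines) []
  PySem.List.sorted (PySem.Set.ofList lines) (fun x => x) false

-- ===== PORT B =====
-- B's one pass building line_of: line_of[i] = line number of position i
-- (one extra trailing slot for position len(content))
def pvLineOf : List Char → Int → List Int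
  | [], ln => [ln]
  | c :: rest, ln =>
    let ln' := if c = '\n' then ln + 1 else ln
    ln' :: pvLineOf rest ln'

-- B's 'while i != -1' loop for one value v
def pvWhileB (content : String) (lineOf : List Int) (v : String) :
    Nat → Int → PySem.Set Int → PySem.Set Int
  | 0, _, found => found
  | fuel + 1, i, found =>
    if i ≠ -1 then
      let found' := PySem.Set.add found (PySem.List.pyGetD lineOf i 0)
      pvWhileB content lineOf v fuel (PySem.Str.findFrom content v (i + 1)) found'
    else found

def LineNumbers_alt (content : String) (values : List String) : List Int :=
  let lineOf := pvLineOf content.toList 1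
  let found := values.foldl
      (fun found v =>
        pvWhileB content lineOf v (content.toList.length + 3)
          (PySem.Str.find content v) found)
      PySem.Set.empty
  PySem.List.sorted found (fun x => x) false

-- ===== PRECONDITION & SPEC =====
def Spec_LineNumbers (content : String) (values : List String) (out : List Int) : Prop := out = LineNumbers_alt content values
instance (content : String) (values : List String) (out : List Int) : Decidable (Spec_LineNumbers content values out) := by unfold Spec_LineNumbers; infer_instance

-- ===== CLAIM (what is proved, stated in full; the proofs are below) =====
def Claim_equal_LineNumbers : Prop := ∀ (content : String) (values : List String), Dom_LineNumbers content values → Spec_LineNumbers content values (LineNumbers content values)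

-- ===== LEMMAS AND PROOFS =====

-- findFrom from a nonnegative start returns -1 or an index in [0, len]
theorem pv_findFrom_bounds (s sub : List Char) (k : Int) (hk : 0 ≤ k) :
    PySem.Chars.findFrom s sub k none = -1 ∨
      (0 ≤ PySem.Chars.findFrom s sub k none ∧
        PySem.Chars.findFrom s sub k none ≤ (s.length : Int)) := by
  unfold PySem.Chars.findFrom
  simp only
  rw [if_neg (by omega : ¬ k < 0)]
  by_cases h : (s.length : Int) < k
  · rw [if_pos h]; left; rfl
  · rw [if_neg h]
    have hr1 := PySem.Chars.neg_one_le_find (List.drop k.toNat (List.take (s.length : Int).toNat s)) sub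
    have hr2 := PySem.Chars.find_le_length (List.drop k.toNat (List.take (s.length : Int).toNat s)) sub
    by_cases hr : PySem.Chars.find (List.drop k.toNat (List.take (s.length : Int).toNat s)) sub = -1
    · rw [if_pos hr]; left; rfl
    · rw [if_neg hr]; right
      constructor
      · omega
      · have : (List.drop k.toNat (List.take (s.length : Int).toNat s)).length ≤ s.length - k.toNat := by
          simp [List.length_drop]
        omega

-- the scan of A's line map built from a strictly increasing list of newline
-- positions counts the positions ≤ indx
theorem pv_scan_enum (nls : List Int) :
    ∀ (s i : Int), nls.Pairwise (· < ·) → 0 ≤ i →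
    pvScanLineMap ((PySem.List.enumerate nls s).map (fun p => (p.1 + 2, p.2))) i (s + 1)
      = s + 1 + (nls.countP (fun p => decide (p ≤ i)) : Int) := by
  induction nls with
  | nil => intro s i _ _; simp [PySem.List.enumerate, pvScanLineMap]
  | cons p rest ih =>
    intro s i hpw hi
    rw [PySem.List.enumerate_cons]
    simp only [List.map_cons, pvScanLineMap]
    by_cases hp : i < p
    · rw [if_pos hp]
      have hz : (p :: rest).countP (fun q => decide (q ≤ i)) = 0 := by
        rw [List.countP_eq_zero]
        intro q hq
        rcases List.mem_cons.mp hq with hq | hq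
        · subst hq; simp; omega
        · have := (List.pairwise_cons.mp hpw).1 q hq
          simp; omega
      rw [hz]; simp
    · rw [if_neg hp]
      have h := ih (s + 1) i (List.pairwise_cons.mp hpw).2 hi
      rw [show s + 1 + 1 = s + 2 by ring] at h
      rw [h, List.countP_cons_of_pos (p := fun q => decide (q ≤ i)) (by simp; omega)]
      push_cast
      ring

-- B's table: entry k of pvLineOf is ln plus the newlines among the first k+1 chars
theorem pv_lineOf_get (chars : List Char) :
    ∀ (k : Nat) (ln : Int), k ≤ chars.length →
    (pvLineOf chars ln).getD k 0
      = ln + ((chars.take (k + 1)).countP (fun c => c == '\n') : Int) := by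
  induction chars with
  | nil => intro k ln hk; simp_all [pvLineOf]
  | cons c cs ih =>
    intro k ln hk
    simp only [pvLineOf]
    cases k with
    | zero =>
      by_cases hc : c = '\n' <;> simp [hc]
    | succ k' =>
      have hk' : k' ≤ cs.length := by simpa using hk
      simp only [List.getD_cons_succ]
      rw [ih k' _ hk']
      by_cases hc : c = '\n' <;>
        simp [hc, List.take_succ_cons, List.countP_cons] <;> push_cast <;> ring

-- counting over take = counting the in-range filtered indices
theorem pv_count_take (chars : List Char) :
    ∀ (m : Nat),
    (chars.take m).countP (fun c => c == '\n')
      = ((List.range chars.length).filter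
          (fun j => decide (j < m) && (chars[j]? == some '\n'))).length := by
  induction chars with
  | nil => intro m; simp
  | cons c cs ih =>
    intro m
    rw [List.length_cons, List.range_succ_eq_map]
    cases m with
    | zero => simp
    | succ m' =>
      rw [List.take_succ_cons, List.countP_cons, ih m']
      simp only [List.filter_cons, List.filter_map]
      have hpred : ∀ j : Nat,
          (decide (Nat.succ j < m' + 1) && ((c :: cs)[Nat.succ j]? == some '\n'))
            = (decide (j < m') && (cs[j]? == some '\n')) := by
        intro j; simp
      simp only [Function.comp_def, hpred]
      by_cases hc : c = '\n' <;> simp [hc, List.length_map]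

-- the two line-number computations agree on every position 0 ≤ j ≤ len
theorem pv_lineAt_agree (content : String) :
    ∀ (j : Int) (ln : Int), 0 ≤ j → j ≤ (content.toList.length : Int) →
    pvScanLineMap
      ((PySem.List.enumerate
        ((PySem.List.pyRange 0 (PySem.Str.len content) 1).filter
          (fun i => PySem.Str.pyGet? content i == some '\n')) 0).foldl
        (fun acc p => acc ++ [(p.1 + 2, p.2)]) [((1 : Int), (0 : Int))]) j ln
      = PySem.List.pyGetD (pvLineOf content.toList 1) j 0 := by
  intro j ln hj hle
  lift j to Nat using hj with k
  have hk : k ≤ content.toList.length := by exact_mod_cast hle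
  -- right-hand side: table lookup
  rw [PySem.List.pyGetD_natCast, pv_lineOf_get content.toList k 1 hk]
  -- left-hand side: normalise the line map
  rw [PySem.List.foldl_append_singleton_eq_map]
  rw [PySem.Str.len_eq, PySem.List.pyRange_zero_natCast]
  rw [List.filter_map]
  have hget : ∀ j : Nat,
      ((fun i => PySem.Str.pyGet? content i == some '\n') ∘ (fun k : Nat => (k : Int)))
        = fun j : Nat => (content.toList[j]? == some '\n') := by
    intro _; funext j; simp
  rw [hget 0]
  set fl := (List.range content.toList.length).filter
      (fun j => content.toList[j]? == some '\n') with hfl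
  have hpw : (fl.map (fun k : Nat => (k : Int))).Pairwise (· < ·) := by
    rw [List.pairwise_map]
    exact ((List.pairwise_lt_range).filter _).imp (by intro a b h; exact_mod_cast h)
  -- peel the (1, 0) head of the line map
  have hhead : pvScanLineMap
      (((1 : Int), (0 : Int)) ::
        (PySem.List.enumerate (fl.map (fun k : Nat => (k : Int))) 0).map
          (fun p => (p.1 + 2, p.2))) (k : Int) ln
      = pvScanLineMap
          ((PySem.List.enumerate (fl.map (fun k : Nat => (k : Int))) 0).map
            (fun p => (p.1 + 2, p.2))) (k : Int) 1 := by
    simp only [pvScanLineMap]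
    rw [if_neg (by omega : ¬ ((k : Int)) < 0)]
  rw [List.singleton_append, hhead]
  have hscan := pv_scan_enum (fl.map (fun k : Nat => (k : Int))) 0 (k : Int) hpw
      (by omega)
  rw [show (0 : Int) + 1 = 1 by ring] at hscan
  rw [hscan]
  -- identify the two counts
  have hcnt : (fl.map (fun k : Nat => (k : Int))).countP (fun p => decide (p ≤ (k : Int)))
      = (content.toList.take (k + 1)).countP (fun c => c == '\n') := by
    rw [List.countP_map]
    have : ((fun p : Int => decide (p ≤ (k : Int))) ∘ (fun k : Nat => (k : Int)))
        = fun j : Nat => decide (j < k + 1) := by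
      funext j; simp [Nat.lt_add_one_iff]
    rw [this, hfl, List.countP_filter, pv_count_take content.toList (k + 1),
        List.countP_eq_length_filter]
  rw [hcnt]

-- A's while-loop returns its lines once the search index has gone to -1
theorem pvWhileA_neg (content : String) (lineMap : List (Int × Int)) (v : String)
    (fuel : Nat) (indx inc ln : Int) (lines : List Int) (h : ¬ indx > -1) :
    pvWhileA content lineMap v fuel indx inc ln lines = lines := by
  cases fuel with
  | zero => rfl
  | succ f => rw [pvWhileA, if_neg h]

-- the two inner while-loops run in lockstep and build the same set
theorem pv_while_agree (content : String) (lineMap : List (Int × Int)) (lineOf : List Int)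
    (H : ∀ (j : Int) (ln : Int), 0 ≤ j → j ≤ (content.toList.length : Int) →
      pvScanLineMap lineMap j ln = PySem.List.pyGetD lineOf j 0)
    (v : String) :
    ∀ (fuel : Nat) (indx inc ln : Int) (lines : List Int), 0 ≤ indx → 0 ≤ inc →
    PySem.Set.ofList (pvWhileA content lineMap v fuel indx inc ln lines)
      = pvWhileB content lineOf v fuel (PySem.Str.findFrom content v (indx + inc))
          (PySem.Set.ofList lines) := by
  intro fuel
  induction fuel with
  | zero => intro indx inc ln lines _ _; rfl
  | succ f ih =>
    intro indx inc ln lines hindx hinc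
    rw [pvWhileA, pvWhileB, if_pos (by omega : indx > -1)]
    have hb := pv_findFrom_bounds content.toList v.toList (indx + inc) (by omega)
    rw [← PySem.Str.findFrom_eq] at hb
    rcases hb with hm1 | ⟨h0, hlen⟩
    · -- no further occurrence: A makes one idle step and stops, B stops at once
      rw [if_neg (by omega : ¬ PySem.Str.findFrom content v (indx + inc) > -1),
          if_neg (by omega : ¬ PySem.Str.findFrom content v (indx + inc) ≠ -1)]
      exact congrArg _ (pvWhileA_neg content lineMap v f _ 1 ln lines (by omega))
    · -- an occurrence at index i: both record the same line number and continue
      rw [if_pos (by omega : PySem.Str.findFrom content v (indx + inc) > -1),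
          if_pos (by omega : PySem.Str.findFrom content v (indx + inc) ≠ -1)]
      rw [← H (PySem.Str.findFrom content v (indx + inc)) ln h0 hlen]
      rw [ih (PySem.Str.findFrom content v (indx + inc)) 1 _ _ h0 (by omega)]
      congr 1
      simp [PySem.Set.ofList_eq_foldl, List.foldl_append]

theorem LineNumbers_spec_aux (content : String) (values : List String) :
    LineNumbers content values = LineNumbers_alt content values := by
  unfold LineNumbers LineNumbers_alt
  dsimp only
  have H := pv_lineAt_agree content
  congr 1
  have hfold : ∀ (vs : List String) (lines0 : List Int),
      PySem.Set.ofList (vs.foldl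
        (fun lines v => pvWhileA content
          ((PySem.List.enumerate
            ((PySem.List.pyRange 0 (PySem.Str.len content) 1).filter
              (fun i => PySem.Str.pyGet? content i == some '\n')) 0).foldl
            (fun acc p => acc ++ [(p.1 + 2, p.2)]) [((1 : Int), (0 : Int))])
          v (content.toList.length + 3) 0 0 1 lines) lines0)
      = vs.foldl
          (fun found v => pvWhileB content (pvLineOf content.toList 1) v
            (content.toList.length + 3) (PySem.Str.find content v) found)
          (PySem.Set.ofList lines0) := by
    intro vs
    induction vs with
    | nil => intro lines0; rfl
    | cons v rest ihv =>
      intro lines0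
      rw [List.foldl_cons, List.foldl_cons, ihv]
      congr 1
      have h := pv_while_agree content _ (pvLineOf content.toList 1) H v
        (content.toList.length + 3) 0 0 1 lines0 le_rfl le_rfl
      rw [show (0 : Int) + 0 = 0 by ring] at h
      rw [h]
      congr 1
      rw [PySem.Str.findFrom_eq, PySem.Str.find_eq, PySem.Chars.findFrom_zero]
  exact hfold values []

-- ===== VERDICT (by name: the statement is the Claim_ definition above) =====
theorem LineNumbers_spec : Claim_equal_LineNumbers := by
  intro content values _
  unfold Spec_LineNumbers
  exact LineNumbers_spec_aux content values
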